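-- pv_equiv track=rewrite | github.com/aws/aws-sdk-pandas | awswrangler/common.py | calculate_bounders
-- ===== SOURCE A (Python) =====
-- def calculate_bounders(num_items, num_groups):
--     num_groups = num_items if num_items < num_groups else num_groups
--     size = int(num_items / num_groups)
--     rest = num_items % num_groups
--     bounders = []
--     end = 0
--     for _ in range(num_groups):
--         start = end
--         end += size
--         if rest:
--             end += 1
--             rest -= 1
--         bounders.append((start, end))
--     return bounders
-- ===== SOURCE B (Python) =====
-- def calculate_bounders(num_items, num_groups):
--     num_groups = num_items if num_items < num_groups else num_groups
--     size = int(num_items / num_groups)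
--     rest = num_items % num_groups
--     return [(i * size + min(i, rest), (i + 1) * size + min(i + 1, rest))
--             for i in range(num_groups)]
-- ===== Notes on version B (the rewrite author's own statement) =====
-- stated objective: simpler
-- what changed: Replaces the accumulator loop carrying mutable end/rest state with a closed-form per-index formula (i*size + min(i, rest), (i+1)*size + min(i+1, rest)), so each bound is computed independently of the previous one.
import Mathlib
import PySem

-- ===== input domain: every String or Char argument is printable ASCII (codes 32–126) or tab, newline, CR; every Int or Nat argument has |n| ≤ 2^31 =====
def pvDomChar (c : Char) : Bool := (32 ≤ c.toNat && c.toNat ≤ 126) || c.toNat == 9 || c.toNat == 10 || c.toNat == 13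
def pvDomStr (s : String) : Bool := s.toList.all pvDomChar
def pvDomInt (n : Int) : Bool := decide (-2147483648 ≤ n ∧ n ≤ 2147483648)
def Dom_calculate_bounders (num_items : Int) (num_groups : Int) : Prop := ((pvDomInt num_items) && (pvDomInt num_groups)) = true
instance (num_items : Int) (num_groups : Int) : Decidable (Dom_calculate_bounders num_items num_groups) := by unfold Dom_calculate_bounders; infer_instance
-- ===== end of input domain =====

-- B replaces A's accumulator loop (mutable end/rest) by a closed-form per-index formula; same cost, simpler.

-- ===== PORT A =====
def calculate_bounders (num_items : Int) (num_groups : Int) : List (Int × Int) :=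
  -- num_groups = num_items if num_items < num_groups else num_groups
  let g := if num_items < num_groups then num_items else num_groups
  -- int(num_items / num_groups): float division then int() = truncation toward zero, exact on |n| ≤ 2^31 (PySem.Int.truncdiv)
  let size := PySem.Int.truncdiv num_items g
  let rest := PySem.Int.mod num_items g
  -- for _ in range(num_groups): start = end; end += size; if rest: end += 1; rest -= 1; bounders.append((start, end))
  ((PySem.List.pyRange 0 g 1).foldl
    (fun (st : List (Int × Int) × Int × Int) _ =>
      let bounders := st.1
      let e := st.2.1
      let r := st.2.2
      let start := e
      let e := e + size
      let er := if r ≠ 0 then (e + 1, r - 1) else (e, r)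
      (bounders ++ [(start, er.1)], er.1, er.2))
    ([], 0, rest)).1

-- ===== PORT B =====
def calculate_bounders_alt (num_items : Int) (num_groups : Int) : List (Int × Int) :=
  let g := if num_items < num_groups then num_items else num_groups
  let size := PySem.Int.truncdiv num_items g
  let rest := PySem.Int.mod num_items g
  -- [(i*size + min(i, rest), (i+1)*size + min(i+1, rest)) for i in range(num_groups)]
  (PySem.List.pyRange 0 g 1).map
    (fun i => (i * size + min i rest, (i + 1) * size + min (i + 1) rest))

-- ===== PRECONDITION & SPEC =====
-- Pre_ excludes exactly the inputs where min(num_items, num_groups) = 0: there Python A (and B) raise ZeroDivisionError.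
def Pre_calculate_bounders (num_items : Int) (num_groups : Int) : Prop :=
  (if num_items < num_groups then num_items else num_groups) ≠ 0
instance (num_items : Int) (num_groups : Int) : Decidable (Pre_calculate_bounders num_items num_groups) := by unfold Pre_calculate_bounders; infer_instance
def pvWitness_calculate_bounders : Int × Int := (10, 3)

def Spec_calculate_bounders (num_items : Int) (num_groups : Int) (out : List (Int × Int)) : Prop := out = calculate_bounders_alt num_items num_groups
instance (num_items : Int) (num_groups : Int) (out : List (Int × Int)) : Decidable (Spec_calculate_bounders num_items num_groups out) := by unfold Spec_calculate_bounders; infer_instance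

-- ===== CLAIM (what is proved, stated in full; the proofs are below) =====
def Claim_equal_calculate_bounders : Prop := ∀ (num_items : Int) (num_groups : Int), Dom_calculate_bounders num_items num_groups → Pre_calculate_bounders num_items num_groups → Spec_calculate_bounders num_items num_groups (calculate_bounders num_items num_groups)

-- ===== LEMMAS AND PROOFS =====

-- Loop invariant: after processing k iterations, A's accumulator holds the first k closed-form
-- pairs, end = k*size + min k rest and the remaining rest is rest - min k rest.
lemma bounders_loop (size rest : Int) :
    ∀ (l : List Int) (acc : List (Int × Int)) (k : Int), 0 ≤ k →
    (l.foldl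
      (fun (st : List (Int × Int) × Int × Int) _ =>
        let bounders := st.1
        let e := st.2.1
        let r := st.2.2
        let start := e
        let e := e + size
        let er := if r ≠ 0 then (e + 1, r - 1) else (e, r)
        (bounders ++ [(start, er.1)], er.1, er.2))
      (acc, k * size + min k rest, rest - min k rest)).1
    = acc ++ (PySem.List.pyRange k (k + l.length) 1).map
        (fun i => (i * size + min i rest, (i + 1) * size + min (i + 1) rest)) := by
  intro l
  induction l with
  | nil =>
    intro acc k hk
    simp [PySem.List.pyRange_one_eq_nil (le_refl k)]
  | cons a l ih =>
    intro acc k hk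
    have ih' : ∀ (acc' : List (Int × Int)) (e r : Int),
        e = (k + 1) * size + min (k + 1) rest → r = rest - min (k + 1) rest →
        (l.foldl
          (fun (st : List (Int × Int) × Int × Int) _ =>
            let bounders := st.1
            let e := st.2.1
            let r := st.2.2
            let start := e
            let e := e + size
            let er := if r ≠ 0 then (e + 1, r - 1) else (e, r)
            (bounders ++ [(start, er.1)], er.1, er.2))
          (acc', e, r)).1
        = acc' ++ (PySem.List.pyRange (k + 1) (k + 1 + l.length) 1).map
            (fun i => (i * size + min i rest, (i + 1) * size + min (i + 1) rest)) := by
      intro acc' e r he hr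
      rw [he, hr]
      exact ih acc' (k + 1) (by omega)
    have hlen : k + (((a :: l).length : Nat) : Int) = k + 1 + (l.length : Int) := by
      simp
      ring
    have hrng : PySem.List.pyRange k (k + ((a :: l).length : Int)) 1
        = k :: PySem.List.pyRange (k + 1) (k + 1 + (l.length : Int)) 1 := by
      rw [hlen, PySem.List.pyRange_one_cons (by have := Int.natCast_nonneg l.length; omega)]
    rw [hrng, List.foldl_cons, List.map_cons]
    dsimp only at ih' ⊢
    by_cases h : rest - min k rest = 0
    · have h1 : min k rest = rest := by omega
      have h2 : min (k + 1) rest = rest := by omega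
      simp only [h]
      rw [if_neg (by decide : ¬ ((0 : Int) ≠ 0))]
      dsimp only
      rw [ih' _ _ _ (by rw [h1, h2]; ring) (by omega)]
      have hE : k * size + min k rest + size = (k + 1) * size + min (k + 1) rest := by
        rw [h1, h2]; ring
      rw [hE]
      simp
    · have h1 : min k rest = k := by omega
      have h2 : min (k + 1) rest = k + 1 := by omega
      rw [if_pos (show rest - min k rest ≠ 0 from h)]
      dsimp only
      rw [ih' _ _ _ (by rw [h1, h2]; ring) (by omega)]
      have hE : k * size + min k rest + size + 1 = (k + 1) * size + min (k + 1) rest := by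
        rw [h1, h2]; ring
      rw [hE]
      simp

-- ===== VERDICT (by name: the statement is the Claim_ definition above) =====
theorem calculate_bounders_spec : Claim_equal_calculate_bounders := by
  intro num_items num_groups _ _
  unfold Spec_calculate_bounders calculate_bounders calculate_bounders_alt
  dsimp only
  set g := if num_items < num_groups then num_items else num_groups with hg
  by_cases hpos : 0 < g
  · have key := bounders_loop (PySem.Int.truncdiv num_items g) (PySem.Int.mod num_items g)
      (PySem.List.pyRange 0 g 1) [] 0 (le_refl 0)
    have hrest : 0 ≤ PySem.Int.mod num_items g := PySem.Int.mod_nonneg _ hpos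
    have hmin0 : min (0 : Int) (PySem.Int.mod num_items g) = 0 := by omega
    rw [hmin0] at key
    simp only [zero_mul, zero_add, add_zero, sub_zero, List.nil_append,
      PySem.List.length_pyRange_one] at key
    rw [Int.toNat_of_nonneg (le_of_lt hpos)] at key
    exact key
  · rw [PySem.List.pyRange_one_eq_nil (by omega : g ≤ 0)]
    simp
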